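-- pv_equiv track=rewrite | github.com/frankbria/codeframe | codeframe/core/editor.py | _count_indentation_matches
-- ===== SOURCE A (Python) =====
-- def _count_indentation_matches(
--     content_lines: list[str], stripped_search: list[str]
-- ) -> int:
--     n = len(stripped_search)
--     count = 0
--     for i in range(len(content_lines) - n + 1):
--         window = [line.lstrip() for line in content_lines[i : i + n]]
--         if window == stripped_search:
--             count += 1
--     return count
-- ===== SOURCE B (Python) =====
-- def _count_indentation_matches(
--     content_lines: list[str], stripped_search: list[str]
-- ) -> int:
--     # Streaming NFA simulation: one left-to-right pass maintains the set of
--     # active partial-match lengths j (the last j stripped lines equal the first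
--     # j pattern lines); a length reaching n counts one occurrence.  No window
--     # slicing, and each line is lstripped exactly once.
--     n = len(stripped_search)
--     if n == 0:
--         return len(content_lines) + 1
--     count = 0
--     active = []  # partial-match lengths j with 1 <= j < n, ascending
--     for line in content_lines:
--         s = line.lstrip()
--         nxt = []
--         for j in [0] + active:
--             if s == stripped_search[j]:
--                 if j + 1 == n:
--                     count += 1
--                 else:
--                     nxt.append(j + 1)
--         active = nxt
--     return count
-- ===== Notes on version B (the rewrite author's own statement) =====
-- stated objective: alternative
-- what changed: B replaces A's windowed slice-and-restrip comparison by a streaming NFA-style matcher: one left-to-right pass that lstrips each line once and maintains the list of active partial-match lengths, counting whenever a partial match reaches the full pattern length; no window is ever materialised.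
import Mathlib
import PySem

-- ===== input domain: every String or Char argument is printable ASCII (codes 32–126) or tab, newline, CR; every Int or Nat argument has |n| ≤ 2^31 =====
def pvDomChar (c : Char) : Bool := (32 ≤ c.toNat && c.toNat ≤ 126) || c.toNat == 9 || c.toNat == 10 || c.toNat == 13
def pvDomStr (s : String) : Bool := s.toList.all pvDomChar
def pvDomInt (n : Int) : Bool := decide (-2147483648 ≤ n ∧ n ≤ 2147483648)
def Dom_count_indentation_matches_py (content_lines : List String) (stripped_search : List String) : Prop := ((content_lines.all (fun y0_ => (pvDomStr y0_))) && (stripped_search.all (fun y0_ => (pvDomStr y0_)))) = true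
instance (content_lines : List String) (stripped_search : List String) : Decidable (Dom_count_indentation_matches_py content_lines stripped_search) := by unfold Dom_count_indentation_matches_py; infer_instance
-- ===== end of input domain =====

-- B replaces A's window slicing + per-window re-stripping by a streaming NFA-style
-- matcher: one pass that lstrips each line once and maintains the list of active
-- partial-match lengths; objective: alternative (same worst-case cost).

-- ===== PORT A =====
def count_indentation_matches_py (content_lines : List String) (stripped_search : List String) : Int :=
  let n : Int := (stripped_search.length : Int)
  (PySem.List.pyRange 0 ((content_lines.length : Int) - n + 1) 1).foldl
    (fun count i =>
      let window := (PySem.List.slice content_lines (some i) (some (i + n))).map PySem.Str.lstrip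
      if window == stripped_search then count + 1 else count) 0

-- ===== PORT B =====
-- indexing stripped_search[j] always has 0 ≤ j < n in B's loop, so getD is exact
def count_indentation_matches_py_alt (content_lines : List String) (stripped_search : List String) : Int :=
  let n := stripped_search.length
  if n = 0 then (content_lines.length : Int) + 1
  else
    (content_lines.foldl (fun (st : List Nat × Int) line =>
      let s := PySem.Str.lstrip line
      (0 :: st.1).foldl (fun (acc : List Nat × Int) j =>
        if s == stripped_search.getD j "" then
          if j + 1 = n then (acc.1, acc.2 + 1) else (acc.1 ++ [j + 1], acc.2)
        else acc) ([], st.2)) (([] : List Nat), (0 : Int))).2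

-- ===== PRECONDITION & SPEC =====
def Spec_count_indentation_matches_py (content_lines : List String) (stripped_search : List String) (out : Int) : Prop := out = count_indentation_matches_py_alt content_lines stripped_search
instance (content_lines : List String) (stripped_search : List String) (out : Int) : Decidable (Spec_count_indentation_matches_py content_lines stripped_search out) := by unfold Spec_count_indentation_matches_py; infer_instance

-- ===== CLAIM (what is proved, stated in full; the proofs are below) =====
def Claim_equal_count_indentation_matches_py : Prop := ∀ (content_lines : List String) (stripped_search : List String), Dom_count_indentation_matches_py content_lines stripped_search → Spec_count_indentation_matches_py content_lines stripped_search (count_indentation_matches_py content_lines stripped_search)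

-- ===== LEMMAS AND PROOFS =====

-- match of length j ending at position i: the last j of the first i stripped lines
-- equal the first j pattern lines
def matchB (st pat : List String) (j i : Nat) : Bool := pat.take j == (st.take i).drop (i - j)

-- full match starting at k
def fullB (st pat : List String) (k : Nat) : Bool := decide (pat <+: st.drop k)

-- B's inner loop body and outer loop body, named for the proofs
def innerStep (pat : List String) (n : Nat) (s : String) (acc : List Nat × Int) (j : Nat) : List Nat × Int :=
  if s == pat.getD j "" then
    if j + 1 = n then (acc.1, acc.2 + 1) else (acc.1 ++ [j + 1], acc.2)
  else acc

def outerStep (pat : List String) (n : Nat) (st : List Nat × Int) (s : String) : List Nat × Int :=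
  (0 :: st.1).foldl (innerStep pat n s) ([], st.2)

-- "take pat.length l = pat" says exactly "pat is a prefix of l"
theorem take_eq_iff (l pat : List String) : l.take pat.length = pat ↔ pat <+: l := by
  constructor
  · intro h
    rw [← h]
    exact List.take_prefix _ _
  · intro h
    exact (List.prefix_iff_eq_take.mp h).symm

-- A's window condition is a prefix condition on the pre-stripped lines
theorem window_eq_iff (content_lines pat : List String) (k : Nat) :
    ((PySem.List.slice content_lines (some (k : Int)) (some ((k : Int) + (pat.length : Int)))).map PySem.Str.lstrip = pat)
      ↔ pat <+: (content_lines.map PySem.Str.lstrip).drop k := by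
  rw [PySem.List.slice_natCast_add, List.map_take, List.map_drop]
  exact take_eq_iff _ _

-- A as a countP of fullB over the window starts
theorem a_eq_countP (content_lines stripped_search : List String) :
    count_indentation_matches_py content_lines stripped_search
      = ((List.range (((content_lines.length : Int) - (stripped_search.length : Int) + 1)).toNat).countP
          (fullB (content_lines.map PySem.Str.lstrip) stripped_search) : Int) := by
  simp only [count_indentation_matches_py]
  rw [PySem.List.foldl_if_add_one, PySem.List.pyRange_one, List.countP_map]
  simp only [zero_add, Int.sub_zero]
  congr 1
  apply List.countP_congr
  intro k _
  simp only [Function.comp_apply, fullB]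
  rw [beq_iff_eq, decide_eq_true_iff]
  simpa using window_eq_iff content_lines stripped_search k

-- B unfolded to a fold of outerStep over the pre-stripped lines
theorem alt_eq_fold (content_lines stripped_search : List String) (hn : stripped_search.length ≠ 0) :
    count_indentation_matches_py_alt content_lines stripped_search
      = ((content_lines.map PySem.Str.lstrip).foldl
          (outerStep stripped_search stripped_search.length) ([], 0)).2 := by
  simp only [count_indentation_matches_py_alt, List.foldl_map, hn, if_false]
  rfl

-- filterMap of a guarded some is map over filter
theorem filterMap_guard {α β : Type} (c : α → Bool) (f : α → β) (l : List α) :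
    l.filterMap (fun j => if c j then some (f j) else none) = (l.filter c).map f := by
  induction l with
  | nil => rfl
  | cons x xs ih =>
    by_cases h : c x = true
    · simp [h, ih]
    · simp only [Bool.not_eq_true] at h
      simp [h, ih]

-- the inner fold appends the surviving incremented lengths and adds the completed matches
theorem inner_spec (pat : List String) (n : Nat) (s : String) :
    ∀ (L : List Nat) (a : List Nat) (c : Int),
    L.foldl (innerStep pat n s) (a, c)
      = (a ++ L.filterMap (fun j => if (s = pat.getD j "" ∧ j + 1 ≠ n : Bool) then some (j + 1) else none),
         c + (L.countP (fun j => decide (s = pat.getD j "" ∧ j + 1 = n)) : Int)) := by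
  intro L
  induction L with
  | nil => intro a c; simp
  | cons j L ih =>
    intro a c
    rw [List.foldl_cons]
    by_cases h1 : s = pat.getD j ""
    · by_cases h2 : j + 1 = n
      · have hstep : innerStep pat n s (a, c) j = (a, c + 1) := by simp [innerStep, h1, h2]
        rw [hstep, ih, List.filterMap_cons, List.countP_cons]
        rw [List.getD_eq_getElem?_getD] at h1
        simp [h1, h2]
        ring
      · have hstep : innerStep pat n s (a, c) j = (a ++ [j + 1], c) := by simp [innerStep, h1, h2]
        rw [hstep, ih, List.filterMap_cons, List.countP_cons]
        rw [List.getD_eq_getElem?_getD] at h1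
        simp [h1, h2]
    · rw [List.getD_eq_getElem?_getD] at h1
      have hstep : innerStep pat n s (a, c) j = (a, c) := by simp [innerStep, h1]
      rw [hstep, ih, List.filterMap_cons, List.countP_cons]
      simp [h1]

-- extending a partial match by one line
theorem step_iff (st pat : List String) (s : String) (i j : Nat)
    (hs : st[i]? = some s) (hj : j < pat.length) (_hji : j ≤ i) :
    (s = pat.getD j "" ∧ matchB st pat j i = true) ↔ matchB st pat (j + 1) (i + 1) = true := by
  have hiL : i < st.length := by
    by_contra h
    rw [List.getElem?_eq_none (by omega)] at hs
    simp at hs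
  simp only [matchB, beq_iff_eq]
  have hpat : pat.take (j + 1) = (pat.take j).concat (pat.getD j "") := by
    rw [List.take_add_one, List.getElem?_eq_getElem hj, List.concat_eq_append]
    simp [List.getD_eq_getElem?_getD, List.getElem?_eq_getElem hj]
  have hst : (st.take (i + 1)).drop (i + 1 - (j + 1)) = ((st.take i).drop (i - j)).concat s := by
    rw [List.take_add_one, hs, Nat.succ_sub_succ]
    rw [List.drop_append_of_le_length (by simp; omega)]
    simp [List.concat_eq_append]
  rw [hpat, hst, List.concat_inj]
  constructor
  · rintro ⟨h1, h2⟩; exact ⟨h2, h1.symm⟩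
  · rintro ⟨h1, h2⟩; exact ⟨h2.symm, h1⟩

-- the zero-length match always holds
theorem matchB_zero (st pat : List String) (i : Nat) : matchB st pat 0 i = true := by
  simp only [matchB, List.take_zero, Nat.sub_zero, beq_iff_eq]
  rw [eq_comm, List.drop_eq_nil_iff]
  simp

-- a full match ending at i is fullB at its start
theorem matchB_full (st pat : List String) (i : Nat) (hn : pat.length ≤ i) :
    matchB st pat pat.length i = fullB st pat (i - pat.length) := by
  simp only [matchB, fullB, List.take_length]
  rw [List.drop_take]
  have : i - (i - pat.length) = pat.length := by omega
  rw [this, Bool.eq_iff_iff, beq_iff_eq, decide_eq_true_iff]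
  constructor
  · intro h; exact (take_eq_iff _ _).mp h.symm
  · intro h; exact ((take_eq_iff _ _).mpr h).symm

-- mapping successor through a filter of successor-conditions
theorem map_succ_filter (q : Nat → Bool) (l : List Nat) :
    (l.filter (fun j => q (j + 1))).map (fun j => j + 1) = (l.map (fun j => j + 1)).filter q := by
  rw [List.filter_map]
  rfl

-- the loop invariant: after i lines the state is the active partial-match lengths
-- (ascending) and the number of full matches so far
theorem invariant (st pat : List String) (hn : 1 ≤ pat.length) :
    ∀ i, i ≤ st.length →
    (st.take i).foldl (outerStep pat pat.length) ([], 0)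
      = ((List.range' 1 (min i (pat.length - 1))).filter (fun j => matchB st pat j i),
         ((List.range (i + 1 - pat.length)).countP (fullB st pat) : Int)) := by
  set n := pat.length with hnn
  intro i
  induction i with
  | zero =>
    intro _
    simp only [List.take_zero, List.foldl_nil]
    have h1 : min 0 (n - 1) = 0 := Nat.zero_min _
    have h2 : 0 + 1 - n = 0 := by omega
    rw [h1, h2]
    simp
  | succ i ih =>
    intro hi1
    have hiL : i < st.length := by omega
    have hs : st[i]? = some st[i] := List.getElem?_eq_getElem hiL
    set s := st[i] with hsdef
    have htake : st.take (i + 1) = st.take i ++ [s] := by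
      rw [List.take_add_one, hs]; rfl
    rw [htake, List.foldl_append, ih (by omega), List.foldl_cons, List.foldl_nil]
    simp only [outerStep]
    rw [inner_spec]
    set m := min i (n - 1) with hm
    -- the fed list is a filtered initial range
    have hfeed : (0 :: (List.range' 1 m).filter (fun j => matchB st pat j i))
        = (List.range' 0 (m + 1)).filter (fun j => matchB st pat j i) := by
      rw [List.range'_succ, List.filter_cons, matchB_zero]
      simp
    have hmem : ∀ j ∈ List.range' 0 (m + 1), j < n ∧ j ≤ i := by
      intro j hj
      rw [List.mem_range'] at hj
      obtain ⟨k, hk, rfl⟩ := hj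
      omega
    rw [Prod.mk.injEq]
    constructor
    · -- active part
      rw [hfeed, List.filterMap_filter]
      have hcongr : ((List.range' 0 (m + 1)).filterMap
            (fun j => if matchB st pat j i = true then
              (if (s = pat.getD j "" ∧ j + 1 ≠ n : Bool) then some (j + 1) else none) else none))
          = (List.range' 0 (m + 1)).filterMap
            (fun j => if (matchB st pat (j + 1) (i + 1) ∧ j + 1 ≠ n : Bool) then some (j + 1) else none) := by
        apply List.filterMap_congr
        intro j hj
        obtain ⟨hjn, hji⟩ := hmem j hj
        have hiff := step_iff st pat s i j hs hjn hji
        by_cases hm1 : matchB st pat j i = true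
        · by_cases hm2 : s = pat.getD j ""
          · have h3 : matchB st pat (j + 1) (i + 1) = true := hiff.mp ⟨hm2, hm1⟩
            simp [hm1, hm2, h3]
          · have h3 : ¬ matchB st pat (j + 1) (i + 1) = true := fun h => hm2 (hiff.mpr h).1
            rw [List.getD_eq_getElem?_getD] at hm2
            simp [hm1, hm2, h3]
        · have h3 : ¬ matchB st pat (j + 1) (i + 1) = true := fun h => hm1 (hiff.mpr h).2
          simp [hm1, h3]
      rw [hcongr, filterMap_guard,
        map_succ_filter (fun x => decide (matchB st pat x (i + 1) = true ∧ x ≠ n))]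
      have hmr : (List.range' 0 (m + 1)).map (fun j => j + 1) = List.range' 1 (m + 1) := by
        have := List.map_add_range' (a := 1) 0 (m + 1) 1
        simpa [Nat.add_comm] using this
      rw [hmr, List.nil_append]
      -- drop the j ≠ n guard and shrink the range to min (i+1) (n-1)
      by_cases hcase : i < n - 1
      · have hm' : m = i := by omega
        have hmin : min (i + 1) (n - 1) = i + 1 := by omega
        rw [hm', hmin]
        apply List.filter_congr
        intro j hj
        rw [List.mem_range'] at hj
        obtain ⟨k, hk, rfl⟩ := hj
        simp
        intro _
        omega
      · have hm' : m = n - 1 := by omega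
        have hmin : min (i + 1) (n - 1) = n - 1 := by omega
        rw [hm', hmin]
        have hsplit : List.range' 1 (n - 1 + 1) = List.range' 1 (n - 1) ++ [n] := by
          have he : 1 + 1 * (n - 1) = n := by omega
          rw [List.range'_concat, he]
        rw [hsplit, List.filter_append]
        have hlast : [n].filter (fun x => decide (matchB st pat x (i + 1) = true ∧ x ≠ n)) = [] := by
          simp
        rw [hlast, List.append_nil]
        apply List.filter_congr
        intro j hj
        rw [List.mem_range'] at hj
        obtain ⟨k, hk, rfl⟩ := hj
        simp
        intro _
        omega
    · -- count part
      rw [hfeed, List.countP_filter]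
      have hcnt : ((List.range' 0 (m + 1)).countP
            (fun j => decide (s = pat.getD j "" ∧ j + 1 = n) && matchB st pat j i))
          = (List.range' 0 (m + 1)).countP
            (fun j => decide (j = n - 1) && matchB st pat n (i + 1)) := by
        apply List.countP_congr
        intro j hj
        obtain ⟨hjn, hji⟩ := hmem j hj
        have hiff := step_iff st pat s i j hs hjn hji
        simp only [Bool.and_eq_true, decide_eq_true_iff]
        constructor
        · rintro ⟨⟨h1, h2⟩, h3⟩
          have := hiff.mp ⟨h1, h3⟩
          rw [h2] at this
          exact ⟨by omega, this⟩
        · rintro ⟨h1, h2⟩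
          have hj1 : j + 1 = n := by omega
          rw [← hj1] at h2
          obtain ⟨h3, h4⟩ := hiff.mpr h2
          exact ⟨⟨h3, hj1⟩, h4⟩
      rw [hcnt]
      by_cases hfull : matchB st pat n (i + 1) = true
      · have hc : ((List.range' 0 (m + 1)).countP (fun j => decide (j = n - 1) && matchB st pat n (i + 1)))
            = (List.range' 0 (m + 1)).count (n - 1) := by
          rw [hfull, List.count]
          apply List.countP_congr
          intro j _
          simp
        rw [hc, ← List.range_eq_range', List.count_range]
        by_cases hle : n ≤ i + 1
        · have h1 : n - 1 < m + 1 := by omega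
          rw [if_pos h1]
          have h2 : i + 1 + 1 - n = (i + 1 - n) + 1 := by omega
          rw [h2, List.range_succ, List.countP_append]
          have h3 : fullB st pat (i + 1 - n) = true := by
            rw [← matchB_full st pat (i + 1) hle]
            exact hfull
          have h4 : List.countP (fullB st pat) [i + 1 - n] = 1 := by simp [h3]
          rw [h4]
          push_cast
          ring
        · have h1 : ¬ (n - 1 < m + 1) := by omega
          rw [if_neg h1]
          have h2 : i + 1 + 1 - n = i + 1 - n := by omega
          rw [h2]
          simp
      · have hc : ((List.range' 0 (m + 1)).countP (fun j => decide (j = n - 1) && matchB st pat n (i + 1))) = 0 := by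
          rw [List.countP_eq_zero]
          intro j _
          simp only [Bool.and_eq_true]
          rintro ⟨-, h⟩
          exact hfull h
        rw [hc]
        have hle : ¬ n ≤ i + 1 ∨ fullB st pat (i + 1 - n) = false := by
          by_cases hle : n ≤ i + 1
          · right
            rw [← matchB_full st pat (i + 1) hle]
            simpa using hfull
          · left; exact hle
        rcases hle with hle | hle
        · have h2 : i + 1 + 1 - n = i + 1 - n := by omega
          rw [h2]; simp
        · by_cases hle2 : n ≤ i + 1
          · have h2 : i + 1 + 1 - n = (i + 1 - n) + 1 := by omega
            rw [h2, List.range_succ, List.countP_append]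
            have h4 : List.countP (fullB st pat) [i + 1 - n] = 0 := by simp [hle]
            rw [h4]
            simp
          · have h2 : i + 1 + 1 - n = i + 1 - n := by omega
            rw [h2]; simp

-- main equality
theorem main_eq (content_lines stripped_search : List String) :
    count_indentation_matches_py content_lines stripped_search
      = count_indentation_matches_py_alt content_lines stripped_search := by
  rw [a_eq_countP]
  set st := content_lines.map PySem.Str.lstrip with hst
  by_cases hn : stripped_search.length = 0
  · -- empty pattern: every position matches, both sides give length + 1
    rw [List.length_eq_zero_iff.mp hn] at *
    simp only [count_indentation_matches_py_alt]
    have h1 : (((content_lines.length : Int) - ((List.length ([] : List String)) : Int) + 1)).toNat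
        = content_lines.length + 1 := by
      simp only [List.length_nil, Nat.cast_zero, sub_zero]
      omega
    rw [h1]
    have hall : ∀ x ∈ List.range (content_lines.length + 1), fullB st [] x = true := by
      intro x _
      simp [fullB]
    rw [List.countP_eq_length.mpr hall, List.length_range]
    simp
  · -- nonempty pattern: run the invariant to the end of the input
    have h1 : 1 ≤ stripped_search.length := by omega
    rw [alt_eq_fold content_lines stripped_search hn]
    have hlen : st.length = content_lines.length := by simp [hst]
    have := invariant st stripped_search h1 st.length (le_refl _)
    rw [List.take_length] at this
    have harg : (((content_lines.length : Int) - (stripped_search.length : Int) + 1)).toNat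
        = st.length + 1 - stripped_search.length := by
      rw [hlen]
      omega
    rw [harg, this]

-- ===== VERDICT (by name: the statement is the Claim_ definition above) =====
theorem count_indentation_matches_py_spec : Claim_equal_count_indentation_matches_py := by
  intro content_lines stripped_search _
  unfold Spec_count_indentation_matches_py
  exact main_eq content_lines stripped_search
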